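-- pv_equiv track=rewrite | github.com/ff888/SkiJumpinLAB.com | ski/utils/ststistics_helpers.py | files_by_year
-- ===== SOURCE A (Python) =====
-- def files_by_year(csv_files):
--     """
--         Group a list of CSV files by year.
--
--         Args:
--         csv_files (list): A list of CSV filenames.
--
--         Returns:
--         dict: A dictionary where the keys are the years found in the filenames
--               and the values are lists of filenames for each year.
--         """
--     file_year_dict = {}
--     for file in csv_files:
--         year = file.split('-')[0]
--         if year in file:
--             if year in file_year_dict:
--                 file_year_dict[year].append(file)
--             else:
--                 file_year_dict[year] = [file]
--     file_year_dict = dict(sorted(file_year_dict.items(), reverse=True))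
--
--     return file_year_dict
-- ===== SOURCE B (Python) =====
-- def files_by_year(csv_files):
--     def year(f):
--         return f.split('-')[0]
--
--     grouped = {}
--     for f in sorted(csv_files, key=year, reverse=True):
--         grouped.setdefault(year(f), []).append(f)
--     return grouped
-- ===== Notes on version B (the rewrite author's own statement) =====
-- stated objective: idiomatic
-- what changed: Instead of grouping into a dict first and then sorting the dict items (with an always-true 'year in file' guard), B stably sorts the filenames by their year key descending once and fills the dict in a single pass, so no final sort of the items is needed and the guard disappears.
import Mathlib
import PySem

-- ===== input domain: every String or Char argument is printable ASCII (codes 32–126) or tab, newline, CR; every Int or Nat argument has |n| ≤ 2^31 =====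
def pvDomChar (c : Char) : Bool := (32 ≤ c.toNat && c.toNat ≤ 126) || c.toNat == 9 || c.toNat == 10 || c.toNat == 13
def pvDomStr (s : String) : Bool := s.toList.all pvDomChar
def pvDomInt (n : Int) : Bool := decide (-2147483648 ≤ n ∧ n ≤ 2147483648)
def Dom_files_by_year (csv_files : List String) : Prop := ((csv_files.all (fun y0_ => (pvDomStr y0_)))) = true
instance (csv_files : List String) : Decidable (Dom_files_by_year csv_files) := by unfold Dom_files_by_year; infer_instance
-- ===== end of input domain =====

-- B groups after ONE descending stable sort of the filenames instead of grouping first and re-sorting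
-- the dict items (and drops A's always-true 'year in file' guard); return values are proved equal.

-- shared helper: f.split('-')[0]  (split with a nonempty separator never raises; the [0] always exists)
def yearOf (f : String) : String :=
  match PySem.Str.split? f "-" with
  | some (y :: _) => y
  | _ => ""   -- unreachable: split('-') returns a nonempty list

-- ===== PORT A =====
def files_by_year (csv_files : List String) : List (String × List String) :=
  let d := csv_files.foldl (fun d file =>
    let year := yearOf file
    if PySem.Str.isIn year file then            -- if year in file
      if d.contains year then                   -- if year in file_year_dict
        d.insert year (d.getD year [] ++ [file])  -- file_year_dict[year].append(file): value updated in place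
      else
        d.insert year [file]                    -- file_year_dict[year] = [file]
    else d) PySem.Dict.empty
  -- dict(sorted(d.items(), reverse=True)); the tuple comparison is exact with key p.1 here
  -- because dict keys are pairwise distinct, so the second components are never compared
  PySem.List.sorted d.items (fun p => p.1) true

-- ===== PORT B =====
def files_by_year_alt (csv_files : List String) : List (String × List String) :=
  ((PySem.List.sorted csv_files yearOf true).foldl
      -- grouped.setdefault(year(f), []).append(f): exactly d[year(f)] = d.get(year(f), []) + [f]
      (fun d f => d.modify (yearOf f) [] (fun v => v ++ [f])) PySem.Dict.empty).items

-- ===== PRECONDITION & SPEC =====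
def Spec_files_by_year (csv_files : List String) (out : List (String × List String)) : Prop := out = files_by_year_alt csv_files
instance (csv_files : List String) (out : List (String × List String)) : Decidable (Spec_files_by_year csv_files out) := by unfold Spec_files_by_year; infer_instance

-- ===== CLAIM (what is proved, stated in full; the proofs are below) =====
def Claim_equal_files_by_year : Prop := ∀ (csv_files : List String), Dom_files_by_year csv_files → Spec_files_by_year csv_files (files_by_year csv_files)

-- ===== LEMMAS AND PROOFS =====

-- the first piece of splitOn's worker is the accumulated prefix up to the first '-'
lemma splitGo_head : ∀ (fuel : Nat) (l cur : List Char) (acc : List (List Char)), l.length < fuel →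
    ∃ t, PySem.Chars.splitOn.go ['-'] fuel l cur acc
      = acc.reverse ++ (cur.reverse ++ l.takeWhile (fun c => c != '-')) :: t := by
  intro fuel
  induction fuel with
  | zero => intro l cur acc h; omega
  | succ n ih =>
    intro l cur acc h
    cases l with
    | nil =>
      refine ⟨[], ?_⟩
      rw [PySem.Chars.splitOn.go] <;> simp
    | cons c rest =>
      by_cases hc : c = '-'
      · have hp : List.isPrefixOf ['-'] (c :: rest) = true := by
          simp [List.isPrefixOf, hc]
        obtain ⟨t', ht⟩ := ih rest [] (cur.reverse :: acc) (by simp at h ⊢; omega)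
        refine ⟨rest.takeWhile (fun c => c != '-') :: t', ?_⟩
        rw [PySem.Chars.splitOn.go]
        simp [ht, hc]
      · have hp : List.isPrefixOf ['-'] (c :: rest) = false := by
          simp [List.isPrefixOf]; exact fun h' => hc h'.symm
        obtain ⟨t', ht⟩ := ih rest (c :: cur) acc (by simp at h ⊢; omega)
        refine ⟨t', ?_⟩
        rw [PySem.Chars.splitOn.go]
        simp [hp, ht, hc]

-- f.split('-')[0] is the prefix of f before the first '-'
lemma yearOf_eq (f : String) : yearOf f = String.ofList (f.toList.takeWhile (fun c => c != '-')) := by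
  obtain ⟨t, ht⟩ := splitGo_head (f.toList.length + 1) f.toList [] [] (by omega)
  have hs : PySem.Chars.splitOn f.toList ['-'] = (f.toList.takeWhile (fun c => c != '-')) :: t := by
    rw [PySem.Chars.splitOn]
    simpa using ht
  simp [yearOf, PySem.Str.split?, PySem.Chars.split?, hs]

-- the guard 'year in file' of A is always true
lemma isIn_yearOf (f : String) : PySem.Str.isIn (yearOf f) f = true := by
  rw [yearOf_eq, PySem.Str.isIn_iff_infix]
  simpa [String.toList_ofList] using
    (List.takeWhile_prefix (l := f.toList) (fun c => c != '-')).isInfix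

-- A's loop body is exactly a modify, whichever branch runs
lemma bodyA_eq (d : PySem.Dict String (List String)) (file : String) :
    (let year := yearOf file
     if PySem.Str.isIn year file then
       if d.contains year then d.insert year (d.getD year [] ++ [file])
       else d.insert year [file]
     else d)
    = d.modify (yearOf file) [] (fun v => v ++ [file]) := by
  simp only [isIn_yearOf file, if_true]
  by_cases hc : d.contains (yearOf file) = true
  · simp [hc, PySem.Dict.modify]
  · simp [hc, PySem.Dict.modify,
      PySem.Dict.getD_of_not_contains d ([] : List String) (by simpa using hc)]

-- the grouping fold, from empty, yields first-occurrence keys with the filtered files as values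
lemma items_foldMod (l : List String) :
    (l.foldl (fun d f => d.modify (yearOf f) [] (fun v => v ++ [f])) PySem.Dict.empty).items
    = (PySem.List.dedup (l.map yearOf)).map (fun k => (k, l.filter (fun f => yearOf f == k))) := by
  have hkeys : (l.foldl (fun d f => d.modify (yearOf f) [] (fun v => v ++ [f])) PySem.Dict.empty).keys
      = PySem.List.dedup (l.map yearOf) := by
    have h := PySem.Dict.keys_foldl_modify_key l yearOf ([] : List String)
      (fun _ f v => v ++ [f]) PySem.Dict.empty
    simpa [PySem.Set.update_nil_left, PySem.Dict.keys_empty] using h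
  have hnd : (l.foldl (fun d f => d.modify (yearOf f) [] (fun v => v ++ [f])) PySem.Dict.empty).keys.Nodup :=
    PySem.Dict.nodup_keys_foldl_modify_key l yearOf ([] : List String)
      (fun _ f v => v ++ [f]) PySem.Dict.empty (by simp [PySem.Dict.keys_empty])
  have hgetD : ∀ k, (l.foldl (fun d f => d.modify (yearOf f) [] (fun v => v ++ [f])) PySem.Dict.empty).getD k []
      = l.filter (fun f => yearOf f == k) := by
    intro k
    have h1 : l.foldl (fun d f => d.modify (yearOf f) [] (fun v => v ++ [f])) PySem.Dict.empty
        = (l.map (fun f => (yearOf f, f))).foldl (fun d p => d.modify p.1 [] (fun v => v ++ [p.2])) PySem.Dict.empty := by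
      rw [List.foldl_map]
    rw [h1, PySem.Dict.getD_foldl_modify_append]
    simp [List.filter_map, List.map_map, Function.comp_def]
  rw [PySem.Dict.items_eq_map_keys _ hnd ([] : List String), hkeys]
  exact List.map_congr_left (fun k _ => by rw [hgetD])

-- Python's set/dedup keeps a subsequence of the input (first occurrences in order)
lemma setOfList_sublist {α : Type} [BEq α] (l : List α) : (PySem.Set.ofList l).Sublist l := by
  have h : ∀ (l s : List α), ∃ t, List.foldl PySem.Set.add s l = s ++ t ∧ t.Sublist l := by
    intro l
    induction l with
    | nil => intro s; exact ⟨[], by simp, List.Sublist.refl _⟩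
    | cons x xs ih =>
      intro s
      simp only [List.foldl_cons]
      simp only [PySem.Set.add]
      by_cases hc : PySem.Set.contains s x = true
      · rw [if_pos hc]
        obtain ⟨t, h1, h2⟩ := ih s
        exact ⟨t, h1, h2.cons x⟩
      · rw [if_neg hc]
        obtain ⟨t, h1, h2⟩ := ih (s ++ [x])
        refine ⟨x :: t, ?_, h2.cons₂ x⟩
        rw [h1, List.append_assoc]; rfl
  obtain ⟨t, h1, h2⟩ := h l PySem.Set.empty
  have e : PySem.Set.ofList l = t := by
    rw [PySem.Set.ofList, h1]; simp [PySem.Set.empty]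
  rw [e]; exact h2

-- inserting an element whose key is not k leaves the k-filter unchanged
lemma insertBy_filter_ne {α κ : Type} [LinearOrder κ] [BEq κ] [LawfulBEq κ]
    (key : α → κ) (x : α) (k : κ) (hk : key x ≠ k) (l : List α) :
    (PySem.List.insertBy (fun a b => decide (key b < key a)) x l).filter (fun y => key y == k)
    = l.filter (fun y => key y == k) := by
  induction l with
  | nil => simp [PySem.List.insertBy, hk]
  | cons y ys ih =>
    by_cases h : key y < key x
    · simp [PySem.List.insertBy, h, hk]
    · simp only [PySem.List.insertBy, h, decide_false, Bool.false_eq_true, if_false]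
      simp only [List.filter_cons, ih]

-- on a descending list, inserting x appends it after all elements of equal key (stability)
lemma insertBy_filter_self {α κ : Type} [LinearOrder κ] [BEq κ] [LawfulBEq κ]
    (key : α → κ) (x : α) (l : List α) (hl : l.Pairwise (fun a b => key b ≤ key a)) :
    (PySem.List.insertBy (fun a b => decide (key b < key a)) x l).filter (fun y => key y == key x)
    = l.filter (fun y => key y == key x) ++ [x] := by
  induction l with
  | nil => simp [PySem.List.insertBy]
  | cons y ys ih =>
    have hy : ∀ b ∈ ys, key b ≤ key y := (List.pairwise_cons.mp hl).1
    have htl := (List.pairwise_cons.mp hl).2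
    by_cases h : key y < key x
    · have hnil : (y :: ys).filter (fun z => key z == key x) = [] := by
        rw [List.filter_eq_nil_iff]
        intro a ha
        rcases List.mem_cons.mp ha with rfl | ha'
        · simp; exact ne_of_lt h
        · simp; exact ne_of_lt (lt_of_le_of_lt (hy a ha') h)
      simp [PySem.List.insertBy, h, hnil]
    · simp only [PySem.List.insertBy, h, decide_false, Bool.false_eq_true, if_false]
      simp only [List.filter_cons, ih htl]
      by_cases hyk : key y == key x
      · simp [hyk]
      · simp [hyk]

-- the stable sort preserves the original relative order of the files of each year
lemma sorted_filter_stable {α κ : Type} [LinearOrder κ] [BEq κ] [LawfulBEq κ]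
    (key : α → κ) (xs : List α) (k : κ) :
    (PySem.List.sorted xs key true).filter (fun y => key y == k) = xs.filter (fun y => key y == k) := by
  induction xs using List.reverseRecOn with
  | nil => simp [PySem.List.sorted]
  | append_singleton xs x ih =>
    rw [PySem.List.sorted_rev_eq_foldl_insertBy, List.foldl_append,
      ← PySem.List.sorted_rev_eq_foldl_insertBy]
    simp only [List.foldl_cons, List.foldl_nil]
    by_cases hk : key x = k
    · subst hk
      rw [insertBy_filter_self key x _ (PySem.List.sorted_pairwise_rev xs key), ih]
      simp [List.filter_append]
    · rw [insertBy_filter_ne key x k hk, ih]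
      simp [List.filter_append, hk]

-- first-occurrence keys of the descending-sorted list = the keys sorted descending
lemma dedup_sorted (xs : List String) :
    PySem.List.dedup ((PySem.List.sorted xs yearOf true).map yearOf)
    = PySem.List.sorted (PySem.List.dedup (xs.map yearOf)) (fun k => k) true := by
  refine (PySem.List.sorted_rev_eq_of_perm_of_pairwise_gt _ _ _ ?_ ?_).symm
  · refine (List.perm_ext_iff_of_nodup (PySem.List.nodup_dedup _) (PySem.List.nodup_dedup _)).mpr ?_
    intro k
    simp only [PySem.List.mem_dedup, List.mem_map]
    constructor
    · rintro ⟨f, hf, rfl⟩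
      exact ⟨f, (PySem.List.mem_sorted _ _ _ _).mp hf, rfl⟩
    · rintro ⟨f, hf, rfl⟩
      exact ⟨f, (PySem.List.mem_sorted _ _ _ _).mpr hf, rfl⟩
  · have hsub : (PySem.List.dedup ((PySem.List.sorted xs yearOf true).map yearOf)).Sublist
        ((PySem.List.sorted xs yearOf true).map yearOf) := by
      rw [PySem.List.dedup_eq_ofList]; exact setOfList_sublist _
    have hpw : ((PySem.List.sorted xs yearOf true).map yearOf).Pairwise (fun a b => b ≤ a) := by
      rw [List.pairwise_map]
      exact PySem.List.sorted_pairwise_rev xs yearOf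
    have hle := hpw.sublist hsub
    have hne : (PySem.List.dedup ((PySem.List.sorted xs yearOf true).map yearOf)).Pairwise (· ≠ ·) :=
      PySem.List.nodup_dedup _
    exact (hle.and hne).imp (fun ⟨h1, h2⟩ => lt_of_le_of_ne h1 (Ne.symm h2))

-- A groups in input order, then sorts the (distinct-keyed) items descending
lemma A_eq (xs : List String) : files_by_year xs
    = (PySem.List.sorted (PySem.List.dedup (xs.map yearOf)) (fun k => k) true).map
        (fun k => (k, xs.filter (fun f => yearOf f == k))) := by
  unfold files_by_year
  have hb : (fun (d : PySem.Dict String (List String)) (file : String) =>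
      let year := yearOf file
      if PySem.Str.isIn year file then
        if d.contains year then d.insert year (d.getD year [] ++ [file])
        else d.insert year [file]
      else d)
      = fun d f => d.modify (yearOf f) [] (fun v => v ++ [f]) :=
    funext fun d => funext fun f => bodyA_eq d f
  rw [hb]; dsimp only; rw [items_foldMod]
  refine PySem.List.sorted_rev_eq_of_perm_of_pairwise_gt _ _ _ ?_ ?_
  · exact (PySem.List.sorted_perm (PySem.List.dedup (xs.map yearOf)) (fun k => k) true).map _
  · rw [List.pairwise_map]
    have hle := PySem.List.sorted_pairwise_rev (PySem.List.dedup (xs.map yearOf)) (fun k => k)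
    have hnd : (PySem.List.sorted (PySem.List.dedup (xs.map yearOf)) (fun k => k) true).Nodup :=
      ((PySem.List.sorted_perm _ _ _).symm).nodup (PySem.List.nodup_dedup _)
    exact (hle.and hnd).imp (fun ⟨h1, h2⟩ => lt_of_le_of_ne h1 (Ne.symm h2))

-- B sorts descending first, then groups in one pass
lemma B_eq (xs : List String) : files_by_year_alt xs
    = (PySem.List.sorted (PySem.List.dedup (xs.map yearOf)) (fun k => k) true).map
        (fun k => (k, xs.filter (fun f => yearOf f == k))) := by
  unfold files_by_year_alt
  rw [items_foldMod, dedup_sorted]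
  exact List.map_congr_left (fun k _ => by rw [sorted_filter_stable])

-- ===== VERDICT (by name: the statement is the Claim_ definition above) =====
theorem files_by_year_spec : Claim_equal_files_by_year := by
  intro xs _
  unfold Spec_files_by_year
  rw [A_eq, B_eq]
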